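-- pv_equiv track=rewrite | github.com/keerthivarumbudy/Data-Intelligence-Challenge-group13 | Discrete-Simulations/utils/get_all_reachable_states.py | get_state_info
-- ===== SOURCE A (Python) =====
-- materials =  {'cell_clean': 0,
-- 'cell_wall': -1,
-- 'cell_obstacle': -2,
-- 'cell_robot_n': -3,
-- 'cell_dirty': 1,
-- 'cell_goal': 2,
-- 'cell_death': 3,
-- 'cell_robot_dead_body': 4,
-- }
--
-- def get_state_info(grid):
--     """
--     Given a 2D grid (list of lists), returns a tuple of the following:
--     (clean_tiles_number, is_state_terminal_bool, termination_reason, is_state_goal_bool)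
--
--     Parameters
--     ----------
--     grid : [[int]]
--         A 2D grid (list of lists) of integers.
--
--     Returns
--     -------
--     tuple
--         A tuple of the following:
--         clean_tiles_number: int
--             The number of clean tiles in the grid.
--         is_state_terminal_bool: bool
--             True if the grid is a terminal state, False otherwise.
--         termination_reason: str
--             The reason the grid is a terminal state. Either 'goal' or 'death'.
--             'goal' if the grid is a goal state (all tiles clean), 'death' if the grid is a death state (the robot died or is dead).
--     """
--
--     is_terminal = False
--     termination_reason = None
--     robot_alive = False
--     all_tiles_clean = True
--     clean_tiles_number = 0
--     for row in grid:
--         for cell in row: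
--             if cell == materials['cell_clean']:
--                 clean_tiles_number += 1
--             if cell == materials['cell_robot_n']:
--                 robot_alive = True
--             if cell == materials['cell_dirty'] or cell == materials['cell_goal']:
--                 all_tiles_clean = False
--     if all_tiles_clean:
--         is_terminal = True
--         termination_reason = 'goal'
--     elif not robot_alive:
--         is_terminal = True
--         termination_reason = 'death'
--     return clean_tiles_number, is_terminal, termination_reason
-- ===== SOURCE B (Python) =====
-- def get_state_info(grid):
--     flat = [cell for row in grid for cell in row]
--     clean_tiles_number = flat.count(0)
--     robot_alive = -3 in flat
--     all_tiles_clean = not any(c == 1 or c == 2 for c in flat)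
--     if all_tiles_clean:
--         return clean_tiles_number, True, 'goal'
--     if not robot_alive:
--         return clean_tiles_number, True, 'death'
--     return clean_tiles_number, False, None
-- ===== Notes on version B (the rewrite author's own statement) =====
-- stated objective: idiomatic
-- what changed: Replaces the single fused nested loop carrying three flags with a flatten followed by three specialized passes (count, membership test, any) and an early-return terminal decision.
import Mathlib
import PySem

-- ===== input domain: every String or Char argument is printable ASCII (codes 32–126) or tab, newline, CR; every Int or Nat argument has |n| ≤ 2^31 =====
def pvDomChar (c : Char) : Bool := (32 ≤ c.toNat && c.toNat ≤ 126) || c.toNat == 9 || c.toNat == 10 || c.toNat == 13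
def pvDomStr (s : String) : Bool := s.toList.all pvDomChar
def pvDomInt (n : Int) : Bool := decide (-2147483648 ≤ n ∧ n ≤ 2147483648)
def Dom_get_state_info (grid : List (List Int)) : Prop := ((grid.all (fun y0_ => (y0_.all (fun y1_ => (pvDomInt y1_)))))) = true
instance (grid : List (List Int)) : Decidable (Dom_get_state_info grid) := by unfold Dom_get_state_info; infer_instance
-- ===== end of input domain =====

-- B replaces A's fused nested loop (one pass carrying three accumulators) with a flatten plus
-- three specialized passes (count, membership, any); objective: more idiomatic decomposition.

-- ===== PORT A =====
-- A's inner-loop body on state (clean_tiles_number, robot_alive, all_tiles_clean)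
def pvStepA (s : Int × Bool × Bool) (cell : Int) : Int × Bool × Bool :=
  let c := if cell = 0 then s.1 + 1 else s.1
  let ra := if cell = -3 then true else s.2.1
  let ac := if cell = 1 ∨ cell = 2 then false else s.2.2
  (c, ra, ac)

def get_state_info (grid : List (List Int)) : Int × Bool × Option String :=
  let st := grid.foldl (fun s row => row.foldl pvStepA s) (0, false, true)
  if st.2.2 then (st.1, true, some "goal")
  else if st.2.1 = false then (st.1, true, some "death")
  else (st.1, false, none)

-- ===== PORT B =====
def get_state_info_alt (grid : List (List Int)) : Int × Bool × Option String :=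
  let flat := grid.flatMap (fun row => row)
  let clean : Int := PySem.List.count flat 0
  let robot_alive := flat.contains (-3)
  let all_tiles_clean := !(flat.any (fun c => c == 1 || c == 2))
  if all_tiles_clean then (clean, true, some "goal")
  else if !robot_alive then (clean, true, some "death")
  else (clean, false, none)

-- ===== PRECONDITION & SPEC =====
def Spec_get_state_info (grid : List (List Int)) (out : Int × Bool × Option String) : Prop := out = get_state_info_alt grid
instance (grid : List (List Int)) (out : Int × Bool × Option String) : Decidable (Spec_get_state_info grid out) := by unfold Spec_get_state_info; infer_instance

-- ===== CLAIM (what is proved, stated in full; the proofs are below) =====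
def Claim_equal_get_state_info : Prop := ∀ (grid : List (List Int)), Dom_get_state_info grid → Spec_get_state_info grid (get_state_info grid)

-- ===== LEMMAS AND PROOFS =====

-- A's fold over a flat list computes the three facts B computes by separate passes
theorem pv_fold_flat (xs : List Int) (s : Int × Bool × Bool) :
    xs.foldl pvStepA s
      = (s.1 + (PySem.List.count xs 0 : Int),
         s.2.1 || xs.contains (-3),
         s.2.2 && !(xs.any (fun c => c == 1 || c == 2))) := by
  induction xs generalizing s with
  | nil => simp [PySem.List.count]
  | cons x xs ih =>
    rw [List.foldl_cons, ih]
    obtain ⟨a, ra, ac⟩ := s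
    simp only [pvStepA, PySem.List.count, List.count_cons, List.contains_cons, List.any_cons]
    refine Prod.ext ?_ (Prod.ext ?_ ?_)
    · by_cases h0 : x = 0
      · simp [h0]; ring
      · simp [h0]
    · by_cases h3 : x = (-3 : Int)
      · simp [h3]
      · have hb : ((-3 : Int) == x) = false := by simpa using (Ne.symm h3)
        simp [h3, hb]
    · by_cases h12 : x = 1 ∨ x = 2
      · rcases h12 with h | h <;> simp [h]
      · have h1 : ¬ x = 1 := fun h => h12 (Or.inl h)
        have h2 : ¬ x = 2 := fun h => h12 (Or.inr h)
        have hb1 : ((x : Int) == 1) = false := by simpa using h1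
        have hb2 : ((x : Int) == 2) = false := by simpa using h2
        simp [h12, hb1, hb2]

theorem pv_fold_grid (grid : List (List Int)) :
    grid.foldl (fun s row => row.foldl pvStepA s) ((0 : Int), false, true)
      = ((PySem.List.count (grid.flatMap (fun row => row)) 0 : Int),
         (grid.flatMap (fun row => row)).contains (-3),
         !((grid.flatMap (fun row => row)).any (fun c => c == 1 || c == 2))) := by
  rw [← List.foldl_flatten, pv_fold_flat, List.flatMap_id']
  simp

-- ===== VERDICT (by name: the statement is the Claim_ definition above) =====
theorem get_state_info_spec : Claim_equal_get_state_info := by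
  intro grid _
  unfold Spec_get_state_info get_state_info get_state_info_alt
  rw [pv_fold_grid]
  dsimp only
  split_ifs <;> simp_all
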